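-- pv_equiv track=rewrite | github.com/gnuradio/gnuradio | grc/core/utils/expr_utils.py | _expr_split
-- ===== SOURCE A (Python) =====
-- import string
--
-- VAR_CHARS = string.ascii_letters + string.digits + '_'
--
-- def _expr_split(expr, var_chars=VAR_CHARS):
--     """
--     Split up an expression by non alphanumeric characters, including underscore.
--     Leave strings in-tact.
--     #TODO ignore escaped quotes, use raw strings.
--
--     Args:
--         expr: an expression string
--
--     Returns:
--         a list of string tokens that form expr
--     """
--     toks = list()
--     tok = ''
--     quote = ''
--     for char in expr:
--         if quote or char in var_chars:
--             if char == quote: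
--                 quote = ''
--             tok += char
--         elif char in ("'", '"'):
--             toks.append(tok)
--             tok = char
--             quote = char
--         else:
--             toks.append(tok)
--             toks.append(char)
--             tok = ''
--     toks.append(tok)
--     return [t for t in toks if t]
-- ===== SOURCE B (Python) =====
-- import string
--
-- VAR_CHARS = string.ascii_letters + string.digits + '_'
--
-- def _expr_split(expr, var_chars=VAR_CHARS):
--     """Run-consuming scanner: grab whole var-char runs and whole string
--     literals (with their trailing var-char run) in inner scans, instead of
--     a char-by-char state machine."""
--     toks = []
--     i, n = 0, len(expr)
--     while i < n:
--         c = expr[i]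
--         if c in var_chars:
--             j = i + 1
--             while j < n and expr[j] in var_chars:
--                 j += 1
--             toks.append(expr[i:j])
--             i = j
--         elif c in ('"', "'"):
--             j = i + 1
--             while j < n and expr[j] != c:
--                 j += 1
--             if j < n:
--                 j += 1  # include the closing quote
--                 while j < n and expr[j] in var_chars:
--                     j += 1  # the literal merges with a following var run
--             toks.append(expr[i:j])
--             i = j
--         else:
--             toks.append(c)
--             i += 1
--     return toks
-- ===== Notes on version B (the rewrite author's own statement) =====
-- stated objective: alternative
-- what changed: A's char-by-char state machine with (tok, quote) accumulator state is replaced by a stateless run-consuming scanner that emits one whole token per outer step: a maximal var-char run, a complete string literal together with its trailing var-char run, or a single other character, so the empty-token filter pass disappears.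
import Mathlib
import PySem

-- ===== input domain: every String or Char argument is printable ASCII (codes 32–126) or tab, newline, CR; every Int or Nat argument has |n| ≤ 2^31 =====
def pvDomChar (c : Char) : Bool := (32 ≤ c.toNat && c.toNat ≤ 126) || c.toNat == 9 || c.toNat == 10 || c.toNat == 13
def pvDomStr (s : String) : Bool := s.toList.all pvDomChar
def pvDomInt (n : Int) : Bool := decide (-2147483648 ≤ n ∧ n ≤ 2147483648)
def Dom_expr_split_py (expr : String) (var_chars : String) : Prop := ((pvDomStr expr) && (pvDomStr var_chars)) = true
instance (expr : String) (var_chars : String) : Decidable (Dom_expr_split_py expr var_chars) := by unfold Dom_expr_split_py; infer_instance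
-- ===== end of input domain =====

-- B replaces A's char-by-char state machine by a run-consuming scanner (whole
-- var-char runs / whole string literals per step); alternative decomposition, same cost.

-- ===== PORT A =====
-- A's loop, char by char; state = (toks, tok, quote) with quote = none for Python's ''.
-- Tokens are built as List Char and turned into String at the very end (String ↔ List Char bridge).
def pvAStep (vc : List Char) (st : List (List Char) × List Char × Option Char) (char : Char) :
    List (List Char) × List Char × Option Char :=
  let (toks, tok, quote) := st
  if quote.isSome || char ∈ vc then
    if some char = quote then (toks, tok ++ [char], none)
    else (toks, tok ++ [char], quote)
  else if char = '\'' ∨ char = '"' then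
    (toks ++ [tok], [char], some char)
  else
    (toks ++ [tok, [char]], [], none)

def expr_split_py (expr : String) (var_chars : String) : List String :=
  let vc := var_chars.toList
  let res := expr.toList.foldl (pvAStep vc) ([], [], none)
  ((res.1 ++ [res.2.1]).filter (· ≠ [])).map (fun l => String.ofList l)

-- ===== PORT B =====
-- Source B's scanner: each step consumes a maximal var-char run, a whole string
-- literal (plus its trailing var-char run), or a single other char.
def pvBGo (vc : List Char) : List Char → List String
  | [] => []
  | c :: rest =>
    if c ∈ vc then
      String.ofList (c :: rest.takeWhile (· ∈ vc)) :: pvBGo vc (rest.dropWhile (· ∈ vc))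
    else if c = '"' ∨ c = '\'' then
      let body := rest.takeWhile (· ≠ c)
      match h : rest.dropWhile (· ≠ c) with  -- h is used in decreasing_by
      | [] => [String.ofList (c :: body)]
      | _ :: rest'' =>
        String.ofList (c :: body ++ c :: rest''.takeWhile (· ∈ vc)) ::
          pvBGo vc (rest''.dropWhile (· ∈ vc))
    else
      String.ofList [c] :: pvBGo vc rest
termination_by cs => cs.length
decreasing_by
  · have := List.length_dropWhile_le (p := fun x => decide (x ∈ vc)) rest; simp; omega
  · have h1 := List.length_dropWhile_le (p := fun x => decide (x ≠ c)) rest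
    rw [h] at h1
    have h2 := List.length_dropWhile_le (p := fun x => decide (x ∈ vc)) rest''
    simp at h1 h2 ⊢
    omega
  · simp

def expr_split_py_alt (expr : String) (var_chars : String) : List String :=
  pvBGo var_chars.toList expr.toList

-- ===== PRECONDITION & SPEC =====
def Spec_expr_split_py (expr : String) (var_chars : String) (out : List String) : Prop := out = expr_split_py_alt expr var_chars
instance (expr : String) (var_chars : String) (out : List String) : Decidable (Spec_expr_split_py expr var_chars out) := by unfold Spec_expr_split_py; infer_instance

-- ===== CLAIM (what is proved, stated in full; the proofs are below) =====
def Claim_equal_expr_split_py : Prop := ∀ (expr : String) (var_chars : String), Dom_expr_split_py expr var_chars → Spec_expr_split_py expr var_chars (expr_split_py expr var_chars)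

-- ===== LEMMAS AND PROOFS =====

-- A's loop, abstracted: fA = out-of-string mode with pending token, gA = in-string mode.
mutual
def fA (vc : List Char) (tok : List Char) : List Char → List (List Char)
  | [] => [tok]
  | c :: cs =>
    if c ∈ vc then fA vc (tok ++ [c]) cs
    else if c = '\'' ∨ c = '"' then tok :: gA vc c [c] cs
    else tok :: [c] :: fA vc [] cs
def gA (vc : List Char) (q : Char) (tok : List Char) : List Char → List (List Char)
  | [] => [tok]
  | c :: cs => if c = q then fA vc (tok ++ [q]) cs else gA vc q (tok ++ [c]) cs
end

def mapF (xs : List (List Char)) : List String :=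
  (xs.filter (· ≠ [])).map String.ofList

theorem pvBGo_var {vc : List Char} {c : Char} {rest : List Char} (hv : c ∈ vc) :
    pvBGo vc (c :: rest) =
      String.ofList (c :: rest.takeWhile (· ∈ vc)) :: pvBGo vc (rest.dropWhile (· ∈ vc)) := by
  rw [pvBGo.eq_def]; simp [hv]

theorem pvBGo_quote_nil {vc : List Char} {c : Char} {rest : List Char}
    (hv : c ∉ vc) (hq : c = '"' ∨ c = '\'') (h : rest.dropWhile (· ≠ c) = []) :
    pvBGo vc (c :: rest) = [String.ofList (c :: rest.takeWhile (· ≠ c))] := by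
  rw [pvBGo.eq_def]
  simp only [if_neg hv, if_pos hq]
  split
  · rfl
  · next d rest'' h2 => rw [h] at h2; cases h2

theorem pvBGo_quote_cons {vc : List Char} {c d : Char} {rest rest'' : List Char}
    (hv : c ∉ vc) (hq : c = '"' ∨ c = '\'') (h : rest.dropWhile (· ≠ c) = d :: rest'') :
    pvBGo vc (c :: rest) =
      String.ofList (c :: rest.takeWhile (· ≠ c) ++ c :: rest''.takeWhile (· ∈ vc)) ::
        pvBGo vc (rest''.dropWhile (· ∈ vc)) := by
  rw [pvBGo.eq_def]
  simp only [if_neg hv, if_pos hq]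
  split
  · next h2 => rw [h] at h2; cases h2
  · next e r h2 => rw [h] at h2; cases h2; rfl

theorem pvBGo_other {vc : List Char} {c : Char} {rest : List Char}
    (hv : c ∉ vc) (hq : ¬(c = '"' ∨ c = '\'')) :
    pvBGo vc (c :: rest) = String.ofList [c] :: pvBGo vc rest := by
  rw [pvBGo.eq_def]; simp [hv, hq]

theorem foldA_eq (vc : List Char) (cs : List Char) :
    ∀ (toks : List (List Char)) (tok : List Char) (quote : Option Char),
    (let r := cs.foldl (pvAStep vc) (toks, tok, quote)
     r.1 ++ [r.2.1]) =
      toks ++ (match quote with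
               | none => fA vc tok cs
               | some q => gA vc q tok cs) := by
  induction cs with
  | nil => intro toks tok quote; cases quote <;> simp [fA, gA]
  | cons c cs ih =>
    intro toks tok quote
    cases quote with
    | none =>
      by_cases hv : c ∈ vc
      · simp only [List.foldl_cons, pvAStep, hv, fA]
        simpa [pvAStep, hv] using ih toks (tok ++ [c]) none
      · by_cases hq : c = '\'' ∨ c = '"'
        · simp only [List.foldl_cons, pvAStep, hv, hq, fA]
          have := ih (toks ++ [tok]) [c] (some c)
          simp only at this ⊢
          simp [this]
        · simp only [List.foldl_cons, pvAStep, hv, hq, fA]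
          have := ih (toks ++ [tok, [c]]) [] none
          simp only at this ⊢
          simp [this]
    | some q =>
      by_cases hc : c = q
      · subst hc
        have := ih toks (tok ++ [c]) none
        simp only [List.foldl_cons, pvAStep] at this ⊢
        simp [gA, this]
      · have := ih toks (tok ++ [c]) (some q)
        simp only [List.foldl_cons, pvAStep] at this ⊢
        simp [gA, hc, this]

-- the three simultaneous invariants, proved together by strong induction on the input length
def S1 (vc cs : List Char) : Prop := mapF (fA vc [] cs) = pvBGo vc cs

def S2 (vc cs : List Char) : Prop :=
  ∀ tok : List Char, tok ≠ [] →
    mapF (fA vc tok cs) =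
      String.ofList (tok ++ cs.takeWhile (· ∈ vc)) :: pvBGo vc (cs.dropWhile (· ∈ vc))

-- the token list B produces after an open quote q with pending prefix tok
def pvBGo_strTail (vc : List Char) (q : Char) (tok cs : List Char) : List String :=
  match cs.dropWhile (· ≠ q) with
  | [] => [String.ofList (tok ++ cs)]
  | _ :: rest'' =>
    String.ofList (tok ++ cs.takeWhile (· ≠ q) ++ [q] ++ rest''.takeWhile (· ∈ vc)) ::
      pvBGo vc (rest''.dropWhile (· ∈ vc))

def S3 (vc cs : List Char) : Prop :=
  ∀ (q : Char) (tok : List Char), q ∉ vc → (q = '"' ∨ q = '\'') → tok ≠ [] →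
    mapF (gA vc q tok cs) = pvBGo_strTail vc q tok cs

theorem L4 (vc : List Char) (q : Char) (rest : List Char)
    (hq : q = '"' ∨ q = '\'') (hnv : q ∉ vc) :
    pvBGo_strTail vc q [q] rest = pvBGo vc (q :: rest) := by
  unfold pvBGo_strTail
  cases h : rest.dropWhile (· ≠ q) with
  | nil =>
    have ht : rest.takeWhile (· ≠ q) = rest := by
      have h2 := List.takeWhile_append_dropWhile (p := fun x => decide (x ≠ q)) (l := rest)
      rw [h] at h2; simpa using h2
    rw [pvBGo_quote_nil hnv hq h, ht]
    rfl
  | cons d rest'' =>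
    rw [pvBGo_quote_cons hnv hq h]
    simp

theorem main_inv (vc : List Char) :
    ∀ n : Nat, ∀ cs : List Char, cs.length ≤ n → S1 vc cs ∧ S2 vc cs ∧ S3 vc cs := by
  intro n
  induction n with
  | zero =>
    intro cs hlen
    have : cs = [] := List.eq_nil_of_length_eq_zero (Nat.le_zero.mp hlen)
    subst this
    refine ⟨?_, ?_, ?_⟩
    · simp [S1, fA, mapF, pvBGo]
    · intro tok htok; simp [fA, mapF, htok, pvBGo]
    · intro q tok _ _ htok; simp [gA, mapF, htok, pvBGo_strTail]
  | succ n ih =>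
    intro cs hlen
    have ih1 : ∀ cs' : List Char, cs'.length ≤ n → S1 vc cs' := fun cs' h => (ih cs' h).1
    have ih2 : ∀ cs' : List Char, cs'.length ≤ n → S2 vc cs' := fun cs' h => (ih cs' h).2.1
    have ih3 : ∀ cs' : List Char, cs'.length ≤ n → S3 vc cs' := fun cs' h => (ih cs' h).2.2
    cases cs with
    | nil => exact ih [] (Nat.zero_le n)
    | cons c rest =>
      have hr : rest.length ≤ n := by simp at hlen; omega
      have hs2 : S2 vc (c :: rest) := by
        intro tok htok
        by_cases hv : c ∈ vc
        · rw [show fA vc tok (c :: rest) = fA vc (tok ++ [c]) rest by rw [fA]; simp [hv]]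
          rw [ih2 rest hr (tok ++ [c]) (by simp)]
          simp [hv]
        · have htw : (c :: rest).takeWhile (· ∈ vc) = [] := by
            simp [hv]
          have hdw : (c :: rest).dropWhile (· ∈ vc) = c :: rest := by
            simp [hv]
          by_cases hq : c = '\'' ∨ c = '"'
          · rw [show fA vc tok (c :: rest) = tok :: gA vc c [c] rest by rw [fA]; simp [hv, hq]]
            have hm : mapF (tok :: gA vc c [c] rest) =
                String.ofList tok :: mapF (gA vc c [c] rest) := by simp [mapF, htok]
            rw [hm, ih3 rest hr c [c] hv hq.symm (by simp)]
            rw [L4 vc c rest hq.symm hv, htw, hdw]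
            simp
          · have hq2 : ¬(c = '"' ∨ c = '\'') := by tauto
            rw [show fA vc tok (c :: rest) = tok :: [c] :: fA vc [] rest by
              rw [fA]; simp [hv, hq]]
            have hm : mapF (tok :: [c] :: fA vc [] rest) =
                String.ofList tok :: String.ofList [c] :: mapF (fA vc [] rest) := by
              simp [mapF, htok]
            rw [hm, ih1 rest hr, htw, hdw, pvBGo_other hv hq2]
            simp
      have hs3 : S3 vc (c :: rest) := by
        intro q tok hnv hqq htok
        by_cases hc : c = q
        · subst hc
          rw [show gA vc c tok (c :: rest) = fA vc (tok ++ [c]) rest by rw [gA]; simp]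
          rw [ih2 rest hr (tok ++ [c]) (by simp)]
          unfold pvBGo_strTail
          simp
        · rw [show gA vc q tok (c :: rest) = gA vc q (tok ++ [c]) rest by rw [gA]; simp [hc]]
          rw [ih3 rest hr q (tok ++ [c]) hnv hqq (by simp)]
          unfold pvBGo_strTail
          simp only [List.dropWhile_cons, List.takeWhile_cons]
          cases h : rest.dropWhile (· ≠ q) with
          | nil => simp [hc]
          | cons d rest'' => simp [hc]
      have hs1 : S1 vc (c :: rest) := by
        unfold S1
        by_cases hv : c ∈ vc
        · rw [show fA vc [] (c :: rest) = fA vc ([] ++ [c]) rest by rw [fA]; simp [hv]]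
          rw [ih2 rest hr ([] ++ [c]) (by simp), pvBGo_var hv]
          simp
        · by_cases hq : c = '\'' ∨ c = '"'
          · rw [show fA vc [] (c :: rest) = [] :: gA vc c [c] rest by rw [fA]; simp [hv, hq]]
            have hm : mapF ([] :: gA vc c [c] rest) = mapF (gA vc c [c] rest) := by simp [mapF]
            rw [hm, ih3 rest hr c [c] hv hq.symm (by simp)]
            exact L4 vc c rest hq.symm hv
          · have hq2 : ¬(c = '"' ∨ c = '\'') := by tauto
            rw [show fA vc [] (c :: rest) = [] :: [c] :: fA vc [] rest by
              rw [fA]; simp [hv, hq]]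
            have hm : mapF ([] :: [c] :: fA vc [] rest) =
                String.ofList [c] :: mapF (fA vc [] rest) := by simp [mapF]
            rw [hm, ih1 rest hr, pvBGo_other hv hq2]
      exact ⟨hs1, hs2, hs3⟩

-- ===== VERDICT (by name: the statement is the Claim_ definition above) =====
theorem expr_split_py_spec : Claim_equal_expr_split_py := by
  intro expr var_chars _
  unfold Spec_expr_split_py
  have hf := foldA_eq var_chars.toList expr.toList [] [] none
  simp only [List.nil_append] at hf
  have h1 := (main_inv var_chars.toList expr.toList.length expr.toList (le_refl _)).1
  unfold S1 mapF at h1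
  simp only [expr_split_py, expr_split_py_alt]
  rw [hf]
  exact h1
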